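-- pv_equiv track=rewrite | github.com/kirubasankars/yaal | nodedescriptor.py | _order_list_by_dots
-- ===== SOURCE A (Python) =====
-- def _order_list_by_dots(files):
--     if files is None:
--         return []
--
--     dots = [x.count(".") for x in files]
--     ordered = []
--     for x in range(0, len(dots)):
--         if len(dots) == 0:
--             break
--
--         el = min(dots)
--         while True:
--             try:
--                 idx = dots.index(el)
--                 ordered.append(files[idx])
--                 del files[idx]
--                 del dots[idx]
--             except:
--                 break
--     return ordered
-- ===== SOURCE B (Python) =====
-- def _order_list_by_dots(files):
--     if files is None:
--         return []
--     if not files: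
--         return []
--     buckets = [[] for _ in range(max(f.count(".") for f in files) + 1)]
--     while files:
--         f = files.pop(0)
--         buckets[f.count(".")].append(f)
--     return [f for b in buckets for f in b]
-- ===== Notes on version B (the rewrite author's own statement) =====
-- stated objective: alternative
-- what changed: A's repeated min/index/delete selection of the smallest remaining dot-count class is replaced by a counting (bucket) sort: each file is dropped into the bucket for its dot count in one distribution pass and the buckets are concatenated in ascending order.
import Mathlib
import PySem

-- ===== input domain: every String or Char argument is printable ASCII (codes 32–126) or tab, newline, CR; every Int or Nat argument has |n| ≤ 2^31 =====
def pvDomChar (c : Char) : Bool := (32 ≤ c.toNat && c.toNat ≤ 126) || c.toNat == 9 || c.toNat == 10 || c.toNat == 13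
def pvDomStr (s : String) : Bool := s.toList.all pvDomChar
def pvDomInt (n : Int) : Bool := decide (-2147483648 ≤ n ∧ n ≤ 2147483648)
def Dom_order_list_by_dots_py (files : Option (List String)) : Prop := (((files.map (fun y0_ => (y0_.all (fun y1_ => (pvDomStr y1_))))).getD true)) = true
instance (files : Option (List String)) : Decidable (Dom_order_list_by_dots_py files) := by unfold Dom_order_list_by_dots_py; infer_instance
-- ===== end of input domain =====

-- B replaces A's repeated min/index/delete selection sort by a single-pass bucket
-- (counting) sort over dot counts; return-value equivalence only is proved here
-- (both Pythons empty the `files` list in place on the non-None path).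

-- ===== PORT A =====
def pvCntDots (f : String) : Nat := PySem.Str.count f "."

-- inner `while True: idx = dots.index(el); …` loop; the bare `except:` break is the none branches
def pvInnerA (el : Nat) (files : List String) (dots : List Nat) (ordered : List String) :
    List String × List Nat × List String :=
  match h : PySem.List.index? dots el with
  | none => (files, dots, ordered)
  | some idx =>
      match PySem.List.pyGet? files (idx : Int) with
      | none => (files, dots, ordered)
      | some v => pvInnerA el (files.eraseIdx idx) (dots.eraseIdx idx) (ordered ++ [v])
termination_by dots.length
decreasing_by
  obtain ⟨hk, -, -⟩ := PySem.List.getElem_of_index?_eq_some h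
  simp [List.length_eraseIdx, hk]
  omega

-- `for x in range(0, len(dots))` with the `if len(dots) == 0: break` guard
def pvOuterA : Nat → List String → List Nat → List String → List String
  | 0, _, _, ordered => ordered
  | fuel+1, files, dots, ordered =>
    if dots.length = 0 then ordered
    else
      match PySem.List.min? dots (fun x => x) with
      | none => ordered   -- unreachable: dots ≠ []
      | some el =>
          let r := pvInnerA el files dots ordered
          pvOuterA fuel r.1 r.2.1 r.2.2

def order_list_by_dots_py (files : Option (List String)) : List String :=
  match files with
  | none => []
  | some fs =>
      let dots := fs.map pvCntDots
      pvOuterA dots.length fs dots []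

-- ===== PORT B =====
-- `while files: f = files.pop(0); buckets[f.count(".")].append(f)`
def pvDistribB : List String → List (List String) → List (List String)
  | [], buckets => buckets
  | f :: rest, buckets =>
      pvDistribB rest (buckets.set (pvCntDots f) (buckets.getD (pvCntDots f) [] ++ [f]))

def order_list_by_dots_py_alt (files : Option (List String)) : List String :=
  match files with
  | none => []
  | some fs =>
      if fs.isEmpty then []
      else
        let m := (PySem.List.max? (fs.map pvCntDots) (fun x => x)).getD 0  -- some: fs ≠ []
        (pvDistribB fs (List.replicate (m + 1) [])).flatMap id

-- ===== PRECONDITION & SPEC =====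
def Spec_order_list_by_dots_py (files : Option (List String)) (out : List String) : Prop := out = order_list_by_dots_py_alt files
instance (files : Option (List String)) (out : List String) : Decidable (Spec_order_list_by_dots_py files out) := by unfold Spec_order_list_by_dots_py; infer_instance

-- ===== CLAIM (what is proved, stated in full; the proofs are below) =====
def Claim_equal_order_list_by_dots_py : Prop := ∀ (files : Option (List String)), Dom_order_list_by_dots_py files → Spec_order_list_by_dots_py files (order_list_by_dots_py files)

-- ===== LEMMAS AND PROOFS =====

-- the common value: files grouped by dot count, counts ascending, stable within a group
def pvCanon (fs : List String) (m : Nat) : List String :=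
  (List.range (m + 1)).flatMap (fun c => fs.filter (fun f => pvCntDots f == c))

theorem pvFlatMap_id_eq_range {α : Type} (l : List (List α)) :
    l.flatMap id = (List.range l.length).flatMap (fun c => l.getD c []) := by
  induction l with
  | nil => simp
  | cons a l ih =>
      simp [List.range_succ_eq_map, List.flatMap_map, ih]

theorem pvDistribB_length (fs : List String) (buckets : List (List String)) :
    (pvDistribB fs buckets).length = buckets.length := by
  induction fs generalizing buckets with
  | nil => simp [pvDistribB]
  | cons f rest ih => simp [pvDistribB, ih]

theorem pvGetD_set (l : List (List String)) (i j : Nat) (v : List String) (h : i < l.length) :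
    (l.set i v).getD j [] = if i = j then v else l.getD j [] := by
  by_cases hij : i = j
  · subst hij; simp [List.getD_eq_getElem?_getD, h]
  · simp [List.getD_eq_getElem?_getD, hij]

theorem pvDistribB_getD (fs : List String) (buckets : List (List String)) (c : Nat)
    (hb : ∀ f ∈ fs, pvCntDots f < buckets.length) :
    (pvDistribB fs buckets).getD c [] = buckets.getD c [] ++ fs.filter (fun f => pvCntDots f == c) := by
  induction fs generalizing buckets with
  | nil => simp [pvDistribB]
  | cons f rest ih =>
      have hf : pvCntDots f < buckets.length := hb f (by simp)
      rw [pvDistribB, ih _ (by intro g hg; simpa using hb g (by simp [hg]))]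
      rw [pvGetD_set _ _ _ _ hf, List.filter_cons]
      by_cases hc : pvCntDots f = c
      · simp [hc, List.append_assoc]
      · simp [hc]

theorem pvEraseIdx_append {α : Type} (l1 : List α) (x : α) (l2 : List α) :
    (l1 ++ x :: l2).eraseIdx l1.length = l1 ++ l2 := by
  induction l1 with
  | nil => simp
  | cons a l ih => simp [ih]

theorem pvInnerA_spec (el : Nat) (n : Nat) (fs : List String) (dots : List Nat) (ordered : List String)
    (hn : fs.length ≤ n) (hd : dots = fs.map pvCntDots) :
    pvInnerA el fs dots ordered =
      (fs.filter (fun f => !(pvCntDots f == el)),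
       (fs.filter (fun f => !(pvCntDots f == el))).map pvCntDots,
       ordered ++ fs.filter (fun f => pvCntDots f == el)) := by
  induction n generalizing fs dots ordered with
  | zero =>
      have : fs = [] := List.eq_nil_of_length_eq_zero (Nat.le_zero.mp hn)
      subst this; subst hd
      rw [pvInnerA]
      simp
  | succ n ih =>
      rw [pvInnerA.eq_def]
      split
      · -- index? dots el = none
        rename_i h
        have hnot : el ∉ dots := (PySem.List.index?_eq_none_iff _ _).mp h
        have h1 : fs.filter (fun f => pvCntDots f == el) = [] := by
          rw [List.filter_eq_nil_iff]
          intro a ha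
          simp only [beq_iff_eq]
          intro hEq
          exact hnot (by rw [hd]; exact List.mem_map.mpr ⟨a, ha, hEq⟩)
        have h2 : fs.filter (fun f => !(pvCntDots f == el)) = fs := by
          rw [List.filter_eq_self]
          intro a ha
          simp only [Bool.not_eq_eq_eq_not, Bool.not_true, beq_eq_false_iff_ne, ne_eq]
          intro hEq
          exact hnot (by rw [hd]; exact List.mem_map.mpr ⟨a, ha, hEq⟩)
        simp [h1, h2, hd]
      · -- index? dots el = some idx
        rename_i idx h
        obtain ⟨pre, suf, hsplit, hlen, hnotpre⟩ := (PySem.List.index?_eq_some_iff _ _ _).mp h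
        rw [hd] at hsplit
        obtain ⟨l1, l2, hfs, hm1, hm2⟩ := List.map_eq_append_iff.mp hsplit
        obtain ⟨x, l2', hl2, hx, hm2'⟩ := List.map_eq_cons_iff.mp hm2
        subst hl2
        have hidx : idx = l1.length := by
          rw [← hlen, ← hm1, List.length_map]
        have hget : PySem.List.pyGet? fs (idx : Int) = some x := by
          rw [PySem.List.pyGet?_natCast]
          subst hidx hfs
          rw [List.getElem?_append_right (Nat.le_refl _)]
          simp
        rw [hget]
        have hef : fs.eraseIdx idx = l1 ++ l2' := by
          rw [hfs, hidx]; exact pvEraseIdx_append l1 x l2'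
        have hed : dots.eraseIdx idx = (l1 ++ l2').map pvCntDots := by
          rw [hd, hfs, hidx, List.map_append, List.map_cons, ← List.length_map (f := pvCntDots)]
          rw [pvEraseIdx_append, ← List.map_append]
        have hlen2 : (l1 ++ l2').length ≤ n := by
          have := hn
          rw [hfs] at this
          simp at this ⊢
          omega
        show pvInnerA el (fs.eraseIdx idx) (dots.eraseIdx idx) (ordered ++ [x]) = _
        rw [hef, hed, ih _ _ _ hlen2 rfl]
        have hl1ne : ∀ a ∈ l1, pvCntDots a ≠ el := by
          intro a ha hEq
          exact hnotpre (by rw [← hm1]; exact List.mem_map.mpr ⟨a, ha, hEq⟩)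
        have h1 : l1.filter (fun f => pvCntDots f == el) = [] := by
          rw [List.filter_eq_nil_iff]
          intro a ha
          simpa using hl1ne a ha
        have h2 : l1.filter (fun f => !(pvCntDots f == el)) = l1 := by
          rw [List.filter_eq_self]
          intro a ha
          simpa using hl1ne a ha
        rw [hfs]
        simp [List.filter_append, h1, h2, hx]

theorem pvFilter_eq_nil_of_lt (fs : List String) (c el : Nat)
    (hmin : ∀ f ∈ fs, el ≤ pvCntDots f) (hc : c < el) :
    fs.filter (fun f => pvCntDots f == c) = [] := by
  rw [List.filter_eq_nil_iff]
  intro a ha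
  have := hmin a ha
  simp only [beq_iff_eq]
  omega

theorem pvFilter_ne_filter_eq (fs : List String) (c el : Nat) (hc : c ≠ el) :
    (fs.filter (fun f => !(pvCntDots f == el))).filter (fun f => pvCntDots f == c)
      = fs.filter (fun f => pvCntDots f == c) := by
  rw [List.filter_filter]
  apply List.filter_congr
  intro a _
  by_cases h : pvCntDots a = c
  · simp [h, hc]
  · simp [h]

theorem pvCanon_split (fs : List String) (m el : Nat)
    (hmin : ∀ f ∈ fs, el ≤ pvCntDots f) (hel : el ≤ m) :
    pvCanon fs m =
      fs.filter (fun f => pvCntDots f == el) ++ pvCanon (fs.filter (fun f => !(pvCntDots f == el))) m := by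
  unfold pvCanon
  obtain ⟨k, hk⟩ : ∃ k, m + 1 = el + (k + 1) := ⟨m - el, by omega⟩
  rw [hk, List.range_add, List.flatMap_append, List.flatMap_append]
  have hfront1 : (List.range el).flatMap (fun c => fs.filter (fun f => pvCntDots f == c)) = [] := by
    rw [List.flatMap_eq_nil_iff]
    intro c hc
    exact pvFilter_eq_nil_of_lt fs c el hmin (List.mem_range.mp hc)
  have hfront2 : (List.range el).flatMap
      (fun c => (fs.filter (fun f => !(pvCntDots f == el))).filter (fun f => pvCntDots f == c)) = [] := by
    rw [List.flatMap_eq_nil_iff]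
    intro c hc
    rw [pvFilter_ne_filter_eq fs c el (by have := List.mem_range.mp hc; omega)]
    exact pvFilter_eq_nil_of_lt fs c el hmin (List.mem_range.mp hc)
  rw [hfront1, hfront2, List.nil_append, List.nil_append]
  rw [List.flatMap_map, List.flatMap_map, List.range_succ_eq_map]
  rw [List.flatMap_cons, List.flatMap_cons, List.flatMap_map, List.flatMap_map]
  have hself : (fs.filter (fun f => !(pvCntDots f == el))).filter (fun f => pvCntDots f == el + 0) = [] := by
    rw [List.filter_filter, List.filter_eq_nil_iff]
    intro a _
    by_cases h : pvCntDots a = el <;> simp [h]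
  rw [hself, List.nil_append]
  have htail : (fun d => (fs.filter (fun f => !(pvCntDots f == el))).filter
        (fun f => pvCntDots f == el + Nat.succ d))
      = (fun d => fs.filter (fun f => pvCntDots f == el + Nat.succ d)) := by
    funext d
    exact pvFilter_ne_filter_eq fs (el + Nat.succ d) el (by omega)
  rw [htail]
  simp

theorem pvOuterA_spec (fuel : Nat) (fs ordered : List String) (m : Nat)
    (hfuel : fs.length ≤ fuel) (hm : ∀ f ∈ fs, pvCntDots f ≤ m) :
    pvOuterA fuel fs (fs.map pvCntDots) ordered = ordered ++ pvCanon fs m := by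
  induction fuel generalizing fs ordered with
  | zero =>
      have : fs = [] := List.eq_nil_of_length_eq_zero (Nat.le_zero.mp hfuel)
      subst this
      simp [pvOuterA, pvCanon]
  | succ fuel ih =>
      by_cases hfs : fs = []
      · subst hfs
        simp [pvOuterA, pvCanon]
      · rw [pvOuterA]
        rw [if_neg (by simp [hfs])]
        cases hminq : PySem.List.min? (fs.map pvCntDots) (fun x => x) with
        | none =>
            exact absurd ((PySem.List.min?_eq_none_iff _ _).mp hminq) (by simp [hfs])
        | some el =>
            have hmem := PySem.List.min?_mem hminq
            have hisMin := PySem.List.min?_isMin hminq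
            obtain ⟨f0, hf0, hf0e⟩ := List.mem_map.mp hmem
            have hminfs : ∀ f ∈ fs, el ≤ pvCntDots f := by
              intro f hf
              exact hisMin _ (List.mem_map.mpr ⟨f, hf, rfl⟩)
            have helm : el ≤ m := hf0e ▸ hm f0 hf0
            change pvOuterA fuel (pvInnerA el fs (fs.map pvCntDots) ordered).1
              (pvInnerA el fs (fs.map pvCntDots) ordered).2.1
              (pvInnerA el fs (fs.map pvCntDots) ordered).2.2 = ordered ++ pvCanon fs m
            rw [pvInnerA_spec el fs.length fs _ ordered (Nat.le_refl _) rfl]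
            dsimp only
            have hlt : (fs.filter (fun f => !(pvCntDots f == el))).length < fs.length := by
              rw [List.length_filter_lt_length_iff_exists]
              exact ⟨f0, hf0, by simp [hf0e]⟩
            rw [ih _ _ (by omega) (by intro f hf; exact hm f (List.mem_of_mem_filter hf))]
            rw [List.append_assoc, ← pvCanon_split fs m el hminfs helm]

theorem pvAltCanon (fs : List String) (hne : fs ≠ []) :
    order_list_by_dots_py_alt (some fs) =
      pvCanon fs ((PySem.List.max? (fs.map pvCntDots) (fun x => x)).getD 0) := by
  rw [order_list_by_dots_py_alt]
  rw [if_neg (by simp [hne])]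
  set m := (PySem.List.max? (fs.map pvCntDots) (fun x => x)).getD 0 with hmdef
  cases hmaxq : PySem.List.max? (fs.map pvCntDots) (fun x => x) with
  | none => exact absurd ((PySem.List.max?_eq_none_iff _ _).mp hmaxq) (by simp [hne])
  | some M =>
      have hMm : m = M := by rw [hmdef, hmaxq]; rfl
      have hbound : ∀ f ∈ fs, pvCntDots f < m + 1 := by
        intro f hf
        have h2 := PySem.List.max?_isMax hmaxq (pvCntDots f) (List.mem_map.mpr ⟨f, hf, rfl⟩)
        rw [hMm]; omega
      rw [pvFlatMap_id_eq_range, pvDistribB_length, List.length_replicate]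
      unfold pvCanon
      congr 1
      funext c
      rw [pvDistribB_getD fs _ c (by simpa using hbound)]
      simp [List.getD_eq_getElem?_getD, List.getElem?_replicate]
      split <;> simp

-- ===== VERDICT (by name: the statement is the Claim_ definition above) =====
theorem order_list_by_dots_py_spec : Claim_equal_order_list_by_dots_py := by
  intro files _
  unfold Spec_order_list_by_dots_py
  cases files with
  | none => rfl
  | some fs =>
      by_cases hfs : fs = []
      · subst hfs
        simp [order_list_by_dots_py, order_list_by_dots_py_alt, pvOuterA]
      · rw [pvAltCanon fs hfs]
        show pvOuterA (fs.map pvCntDots).length fs (fs.map pvCntDots) [] = _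
        rw [List.length_map]
        rw [pvOuterA_spec fs.length fs []
          ((PySem.List.max? (fs.map pvCntDots) (fun x => x)).getD 0) (Nat.le_refl _) (by
          intro f hf
          cases hmaxq : PySem.List.max? (fs.map pvCntDots) (fun x => x) with
          | none => exact absurd ((PySem.List.max?_eq_none_iff _ _).mp hmaxq) (by simp [hfs])
          | some M =>
              have h2 := PySem.List.max?_isMax hmaxq (pvCntDots f) (List.mem_map.mpr ⟨f, hf, rfl⟩)
              simpa using h2)]
        rw [List.nil_append]
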